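-- pv_equiv track=rewrite | github.com/SimonHeggie/Blender-Spine-IO | Output/SPINE_Output_meshutils.py | sanitize_vert_edges
-- ===== SOURCE A (Python) =====
-- def sanitize_vert_edges(edges_vert, vcount):
--     if not edges_vert:
--         return []
--     ints = []
--     for x in edges_vert:
--         try:
--             xi = int(x)
--             if 0 <= xi < max(0, int(vcount)):
--                 ints.append(xi)
--         except Exception:
--             pass
--     if len(ints) % 2:
--         ints = ints[:-1]
--     out, seen = [], set()
--     for i in range(0, len(ints), 2):
--         a, b = ints[i], ints[i+1]
--         if a == b:
--             continue
--         p = (a, b) if a < b else (b, a)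
--         if p in seen:
--             continue
--         seen.add(p)
--         out.extend([p[0], p[1]])
--     return out
-- ===== SOURCE B (Python) =====
-- def sanitize_vert_edges(edges_vert, vcount):
--     # Single streaming pass: validate, pair via a 'pending' slot, dedupe as we go.
--     out = []
--     seen = set()
--     pending = None
--     for x in edges_vert:
--         try:
--             xi = int(x)
--             limit = max(0, int(vcount))
--         except Exception:
--             continue
--         if not (0 <= xi < limit):
--             continue
--         if pending is None:
--             pending = xi
--         else:
--             a, b = pending, xi
--             pending = None
--             if a == b:
--                 continue
--             p = (a, b) if a < b else (b, a)
--             if p not in seen: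
--                 seen.add(p)
--                 out.append(p[0])
--                 out.append(p[1])
--     return out
-- ===== Notes on version B (the rewrite author's own statement) =====
-- stated objective: alternative
-- what changed: Replaced A's three phases (build a filtered list, truncate to even length, index it by twos with a range loop) by one streaming pass that pairs valid vertices through a single 'pending' slot, deduplicating on the fly; no intermediate list and no indexing.
import Mathlib
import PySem

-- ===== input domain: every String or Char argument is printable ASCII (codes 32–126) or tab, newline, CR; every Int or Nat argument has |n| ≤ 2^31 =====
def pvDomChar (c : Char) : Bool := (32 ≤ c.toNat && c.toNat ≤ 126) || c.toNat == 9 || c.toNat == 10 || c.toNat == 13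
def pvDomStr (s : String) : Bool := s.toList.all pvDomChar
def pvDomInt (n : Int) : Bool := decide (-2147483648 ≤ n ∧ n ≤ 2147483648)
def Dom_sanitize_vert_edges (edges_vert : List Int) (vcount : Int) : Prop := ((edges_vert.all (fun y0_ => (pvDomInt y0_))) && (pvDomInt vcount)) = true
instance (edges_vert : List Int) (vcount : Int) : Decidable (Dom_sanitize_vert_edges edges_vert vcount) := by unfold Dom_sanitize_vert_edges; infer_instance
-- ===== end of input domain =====

-- B replaces A's three phases (filter to a list, truncate to even length, index by twos)
-- with one streaming pass pairing valid vertices through a 'pending' slot (objective: alternative decomposition).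

-- ===== PORT A =====
-- Note: the try/except in A can never fire for int arguments (int(x)/int(vcount) succeed), so it is not modelled.
-- ints[i]/ints[i+1] are ported with pyGetD (the indices are always in range: i+1 < len for every i of range(0, len, 2) with len even).
def sanitize_vert_edges (edges_vert : List Int) (vcount : Int) : List Int :=
  if edges_vert = [] then []
  else
    let ints := edges_vert.foldl
      (fun acc x => if 0 ≤ x ∧ x < max 0 vcount then acc ++ [x] else acc) []
    let ints := if ints.length % 2 = 1 then PySem.List.slice ints none (some (-1)) else ints
    ((PySem.List.pyRange 0 (ints.length : Int) 2).foldl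
      (fun st i =>
        let a := PySem.List.pyGetD ints i 0
        let b := PySem.List.pyGetD ints (i + 1) 0
        if a = b then st
        else
          let p := if a < b then (a, b) else (b, a)
          if st.2.contains p then st
          else (st.1 ++ [p.1, p.2], PySem.Set.add st.2 p))
      (([] : List Int), (PySem.Set.empty : PySem.Set (Int × Int)))).1

-- ===== PORT B =====
def pvAltLoop (limit : Int) (xs : List Int) (pending : Option Int)
    (out : List Int) (seen : PySem.Set (Int × Int)) : List Int :=
  match xs with
  | [] => out
  | x :: rest =>
    if 0 ≤ x ∧ x < limit then
      match pending with
      | none => pvAltLoop limit rest (some x) out seen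
      | some a =>
        if a = x then pvAltLoop limit rest none out seen
        else
          let p := if a < x then (a, x) else (x, a)
          if seen.contains p then pvAltLoop limit rest none out seen
          else pvAltLoop limit rest none (out ++ [p.1, p.2]) (PySem.Set.add seen p)
    else pvAltLoop limit rest pending out seen

def sanitize_vert_edges_alt (edges_vert : List Int) (vcount : Int) : List Int :=
  let limit := max 0 vcount
  pvAltLoop limit edges_vert none [] PySem.Set.empty

-- ===== PRECONDITION & SPEC =====
def Spec_sanitize_vert_edges (edges_vert : List Int) (vcount : Int) (out : List Int) : Prop := out = sanitize_vert_edges_alt edges_vert vcount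
instance (edges_vert : List Int) (vcount : Int) (out : List Int) : Decidable (Spec_sanitize_vert_edges edges_vert vcount out) := by unfold Spec_sanitize_vert_edges; infer_instance

-- ===== CLAIM (what is proved, stated in full; the proofs are below) =====
def Claim_equal_sanitize_vert_edges : Prop := ∀ (edges_vert : List Int) (vcount : Int), Dom_sanitize_vert_edges edges_vert vcount → Spec_sanitize_vert_edges edges_vert vcount (sanitize_vert_edges edges_vert vcount)

-- ===== LEMMAS AND PROOFS =====

-- the common per-pair transition both loops perform
def pairStep (st : List Int × PySem.Set (Int × Int)) (a b : Int) : List Int × PySem.Set (Int × Int) :=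
  if a = b then st
  else
    let p := if a < b then (a, b) else (b, a)
    if st.2.contains p then st
    else (st.1 ++ [p.1, p.2], PySem.Set.add st.2 p)

-- consume a list two elements at a time (a trailing odd element is ignored)
def pairLoop : List Int → (List Int × PySem.Set (Int × Int)) → List Int × PySem.Set (Int × Int)
  | a :: b :: rest, st => pairLoop rest (pairStep st a b)
  | _, st => st

lemma pyRange_two_nil (a b : Int) (h : b ≤ a) : PySem.List.pyRange a b 2 = [] := by
  rw [PySem.List.pyRange_of_pos a b (by norm_num)]
  simp [if_neg (not_lt.mpr h)]

lemma pyRange_two_step (n : Nat) :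
    PySem.List.pyRange 0 ((n : Int) + 2) 2 = 0 :: (PySem.List.pyRange 0 (n : Int) 2).map (· + 2) := by
  rw [PySem.List.pyRange_of_pos 0 ((n : Int) + 2) (by norm_num),
      PySem.List.pyRange_of_pos 0 (n : Int) (by norm_num)]
  have hcnt : (if (0 : Int) < (n : Int) + 2 then (((n : Int) + 2 - 0 + 2 - 1) / 2).toNat else 0)
      = (if (0 : Int) < (n : Int) then (((n : Int) - 0 + 2 - 1) / 2).toNat else 0) + 1 := by
    split_ifs <;> omega
  rw [hcnt, List.range_succ_eq_map]
  simp [List.map_map, Function.comp]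
  intro k _
  push_cast; ring

lemma pairLoop_dropLast (l : List Int) (h : l.length % 2 = 1) (st : List Int × PySem.Set (Int × Int)) :
    pairLoop l.dropLast st = pairLoop l st := by
  match l with
  | [] => simp at h
  | [a] => simp [pairLoop]
  | a :: b :: rest =>
    have hr : rest.length % 2 = 1 := by simp at h; omega
    have hne : rest ≠ [] := by intro hc; rw [hc] at hr; simp at hr
    have : (a :: b :: rest).dropLast = a :: b :: rest.dropLast := by
      match rest, hne with
      | c :: rest', _ => simp
    rw [this]
    show pairLoop rest.dropLast (pairStep st a b) = pairLoop rest (pairStep st a b)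
    exact pairLoop_dropLast rest hr _
termination_by l.length

-- A's range-by-twos indexing loop is the two-at-a-time loop over the list itself.
lemma rangeLoop_eq (l : List Int) (h : l.length % 2 = 0) (st : List Int × PySem.Set (Int × Int)) :
    (PySem.List.pyRange 0 (l.length : Int) 2).foldl
      (fun st i =>
        let a := PySem.List.pyGetD l i 0
        let b := PySem.List.pyGetD l (i + 1) 0
        if a = b then st
        else
          let p := if a < b then (a, b) else (b, a)
          if st.2.contains p then st
          else (st.1 ++ [p.1, p.2], PySem.Set.add st.2 p)) st
    = pairLoop l st := by
  match l with
  | [] => simp [pyRange_two_nil, pairLoop]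
  | [a] => simp at h
  | a :: b :: rest =>
    have hr : rest.length % 2 = 0 := by simp at h; omega
    have hlen : ((a :: b :: rest).length : Int) = (rest.length : Int) + 2 := by simp; ring
    rw [hlen, pyRange_two_step rest.length]
    rw [List.foldl_cons, List.foldl_map]
    have hshift : ∀ (acc : List Int × PySem.Set (Int × Int)), ∀ i ∈ PySem.List.pyRange 0 (rest.length : Int) 2,
        (fun st i =>
          let a' := PySem.List.pyGetD (a :: b :: rest) i 0
          let b' := PySem.List.pyGetD (a :: b :: rest) (i + 1) 0
          if a' = b' then st
          else
            let p := if a' < b' then (a', b') else (b', a')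
            if st.2.contains p then st
            else (st.1 ++ [p.1, p.2], PySem.Set.add st.2 p)) acc (i + 2)
        = (fun st i =>
          let a' := PySem.List.pyGetD rest i 0
          let b' := PySem.List.pyGetD rest (i + 1) 0
          if a' = b' then st
          else
            let p := if a' < b' then (a', b') else (b', a')
            if st.2.contains p then st
            else (st.1 ++ [p.1, p.2], PySem.Set.add st.2 p)) acc i := by
      intro acc i hi
      have hi0 : 0 ≤ i := ((PySem.List.mem_pyRange_iff_of_pos (by norm_num) i).1 hi).1
      obtain ⟨k, rfl⟩ : ∃ k : Nat, i = (k : Int) := ⟨i.toNat, (Int.toNat_of_nonneg hi0).symm⟩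
      beta_reduce
      have e1 : (k : Int) + 2 = ((k + 2 : Nat) : Int) := by push_cast; ring
      rw [e1]
      have e2 : ((k + 2 : Nat) : Int) + 1 = ((k + 3 : Nat) : Int) := by push_cast; ring
      have e3 : (k : Int) + 1 = ((k + 1 : Nat) : Int) := by push_cast; ring
      rw [e2, e3, PySem.List.pyGetD_natCast, PySem.List.pyGetD_natCast,
          PySem.List.pyGetD_natCast, PySem.List.pyGetD_natCast]
      simp [List.getD]
    rw [PySem.List.foldl_congr_mem _ _ _ _ hshift, rangeLoop_eq rest hr]
    have g0 : PySem.List.pyGetD (a :: b :: rest) 0 0 = a := by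
      have h0 : (0 : Int) = ((0 : Nat) : Int) := by norm_num
      rw [h0, PySem.List.pyGetD_natCast]; rfl
    have g1 : PySem.List.pyGetD (a :: b :: rest) (0 + 1) 0 = b := by
      have h1 : (0 : Int) + 1 = ((1 : Nat) : Int) := by norm_num
      rw [h1, PySem.List.pyGetD_natCast]; rfl
    simp only [g0, g1]
    conv_rhs => rw [pairLoop]
    simp only [pairStep]
termination_by l.length

lemma foldl_filter_acc (P : Int → Prop) [DecidablePred P] (l : List Int) (acc : List Int) :
    l.foldl (fun acc x => if P x then acc ++ [x] else acc) acc
      = acc ++ l.filter (fun x => decide (P x)) := by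
  induction l generalizing acc with
  | nil => simp
  | cons x rest ih =>
    by_cases hx : P x <;> simp [hx, ih, List.append_assoc]

-- B's streaming pass equals the two-at-a-time loop over the filtered list,
-- with the pending element (if any) prepended.
lemma altLoop_eq (limit : Int) (xs : List Int) (pending : Option Int)
    (out : List Int) (seen : PySem.Set (Int × Int)) :
    pvAltLoop limit xs pending out seen
      = (pairLoop (pending.toList ++ xs.filter (fun x => decide (0 ≤ x ∧ x < limit))) (out, seen)).1 := by
  induction xs generalizing pending out seen with
  | nil => cases pending <;> simp [pvAltLoop, pairLoop]
  | cons x rest ih =>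
    by_cases hx : 0 ≤ x ∧ x < limit
    · cases pending with
      | none =>
        simp only [pvAltLoop, if_pos hx, List.filter_cons, decide_eq_true hx]
        rw [ih (some x) out seen]
        simp
      | some a =>
        have hfil : (x :: rest).filter (fun y => decide (0 ≤ y ∧ y < limit))
            = x :: rest.filter (fun y => decide (0 ≤ y ∧ y < limit)) := by
          simp [List.filter_cons, hx]
        simp only [pvAltLoop, if_pos hx, Option.toList, List.cons_append, List.nil_append, hfil]
        rw [show pairLoop (a :: x :: rest.filter (fun y => decide (0 ≤ y ∧ y < limit))) (out, seen)
              = pairLoop (rest.filter (fun y => decide (0 ≤ y ∧ y < limit))) (pairStep (out, seen) a x) from rfl]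
        by_cases hab : a = x
        · simp only [pairStep, if_pos hab]
          exact ih none out seen
        · simp only [pairStep, if_neg hab]
          by_cases hc : PySem.Set.contains seen (if a < x then (a, x) else (x, a)) = true
          · simp only [hc, if_true]
            exact ih none out seen
          · simp only [Bool.not_eq_true] at hc
            simp only [hc, Bool.false_eq_true, if_false]
            exact ih none _ _
    · simp only [pvAltLoop, if_neg hx, List.filter_cons, decide_eq_false hx]
      exact ih pending out seen

-- ===== VERDICT (by name: the statement is the Claim_ definition above) =====
theorem sanitize_vert_edges_spec : Claim_equal_sanitize_vert_edges := by
  intro ev vc _hdom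
  unfold Spec_sanitize_vert_edges sanitize_vert_edges sanitize_vert_edges_alt
  rw [altLoop_eq]
  by_cases hev : ev = []
  · simp [hev, pairLoop]
  · rw [if_neg hev]
    simp only [Option.toList, List.nil_append]
    rw [foldl_filter_acc (fun x => 0 ≤ x ∧ x < max 0 vc) ev []]
    rw [List.nil_append]
    set ints := ev.filter (fun x => decide (0 ≤ x ∧ x < max 0 vc)) with hints
    by_cases hodd : ints.length % 2 = 1
    · rw [if_pos hodd, PySem.List.slice_to_neg_one]
      rw [rangeLoop_eq ints.dropLast (by simp [List.length_dropLast]; omega)]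
      rw [pairLoop_dropLast ints hodd]
    · rw [if_neg hodd]
      rw [rangeLoop_eq ints (by omega)]
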